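-- pv_equiv track=rewrite | github.com/emilyjennings/python-practice | helloworld.py | xo
-- ===== SOURCE A (Python) =====
-- def xo(s):
--     array = s.split()
--     xs = 0
--     os = 0
--     x = "x"
--     o = "o"
--     for item in array:
--         if item == o:
--             os += 1
--         elif item == x:
--             xs += 1
--
--     if xs == os:
--         return True
-- ===== SOURCE B (Python) =====
-- def xo(s):
--     # Pair x's against o's symmetrically: sort the relevant tokens, then the
--     # multiset has equal counts iff the sorted list equals its own x<->o
--     # swapped mirror image.
--     toks = sorted(t for t in s.split() if t in ("x", "o"))
--     mirror = ["o" if t == "x" else "x" for t in reversed(toks)]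
--     if toks == mirror:
--         return True
-- ===== Notes on version B (the rewrite author's own statement) =====
-- stated objective: alternative
-- what changed: Instead of counting tokens, B sorts the relevant tokens and tests whether the sorted list equals its own reversed x<->o-swapped mirror (equal counts iff the sorted o...ox...x block is symmetric).
import Mathlib
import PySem

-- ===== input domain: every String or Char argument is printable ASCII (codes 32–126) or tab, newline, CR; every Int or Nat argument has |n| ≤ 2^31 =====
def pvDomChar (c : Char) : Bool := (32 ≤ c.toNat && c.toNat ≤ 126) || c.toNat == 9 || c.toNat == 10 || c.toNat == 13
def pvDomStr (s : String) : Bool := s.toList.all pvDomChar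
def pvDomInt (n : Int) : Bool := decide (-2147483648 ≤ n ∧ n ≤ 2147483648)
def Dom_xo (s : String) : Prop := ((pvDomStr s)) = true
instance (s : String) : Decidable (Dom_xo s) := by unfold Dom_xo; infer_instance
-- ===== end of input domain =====

-- B replaces A's counting loop by a sort-and-mirror symmetry test: the sorted
-- relevant tokens equal their own reversed x<->o-swapped image iff counts match.

-- ===== PORT A =====
def xo (s : String) : Option Bool :=
  let array := PySem.Str.split₀ s
  let state := array.foldl (fun (p : Int × Int) item =>
    if item == "o" then (p.1, p.2 + 1)
    else if item == "x" then (p.1 + 1, p.2)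
    else p) (0, 0)
  if state.1 == state.2 then some true else none

-- ===== PORT B =====
def xo_alt (s : String) : Option Bool :=
  let toks := PySem.List.sorted
    ((PySem.Str.split₀ s).filter (fun t => t == "x" || t == "o")) (fun t => t) false
  let mirror := toks.reverse.map (fun t => if t == "x" then "o" else "x")
  if toks == mirror then some true else none

-- ===== PRECONDITION & SPEC =====
def Spec_xo (s : String) (out : Option Bool) : Prop := out = xo_alt s
instance (s : String) (out : Option Bool) : Decidable (Spec_xo s out) := by unfold Spec_xo; infer_instance

-- ===== CLAIM (what is proved, stated in full; the proofs are below) =====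
def Claim_equal_xo : Prop := ∀ (s : String), Dom_xo s → Spec_xo s (xo s)

-- ===== LEMMAS AND PROOFS =====

-- A's counting loop computes (count of "x", count of "o") added to the initial state.
theorem xo_fold_counts (l : List String) (a b : Int) :
    l.foldl (fun (p : Int × Int) item =>
      if item == "o" then (p.1, p.2 + 1)
      else if item == "x" then (p.1 + 1, p.2)
      else p) (a, b) = (a + l.count "x", b + l.count "o") := by
  induction l generalizing a b with
  | nil => simp
  | cons h t ih =>
    simp only [List.foldl_cons]
    by_cases ho : h = "o"
    · simp only [ho, beq_self_eq_true, if_true, ih]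
      simp; ring
    · by_cases hx : h = "x"
      · have : (h == "o") = false := by simp [ho]
        simp only [hx, beq_self_eq_true, if_true, ih]
        simp; ring
      · have h1 : (h == "o") = false := by simp [ho]
        have h2 : (h == "x") = false := by simp [hx]
        simp only [h1, h2, Bool.false_eq_true, if_false, ih]
        simp [hx, ho]

-- Any list of tokens drawn from {"o","x"} is a permutation of o-block ++ x-block.
theorem perm_blocks (l : List String) (h : ∀ t ∈ l, t = "o" ∨ t = "x") :
    l.Perm (List.replicate (l.count "o") "o" ++ List.replicate (l.count "x") "x") := by
  induction l with
  | nil => simp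
  | cons hd tl ih =>
    have htl : ∀ t ∈ tl, t = "o" ∨ t = "x" := fun t ht => h t (List.mem_cons_of_mem _ ht)
    rcases h hd (List.mem_cons_self) with rfl | rfl
    · have h1 : ("o" :: tl).count "o" = tl.count "o" + 1 := by simp
      have h2 : ("o" :: tl).count "x" = tl.count "x" := by simp
      rw [h1, h2, List.replicate_succ, List.cons_append]
      exact (ih htl).cons "o"
    · have h1 : ("x" :: tl).count "o" = tl.count "o" := by simp
      have h2 : ("x" :: tl).count "x" = tl.count "x" + 1 := by simp
      rw [h1, h2, List.replicate_succ]
      exact ((ih htl).cons "x").trans List.perm_middle.symm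

-- The sorted filtered token list is exactly the o-block followed by the x-block.
theorem sorted_blocks (l : List String) (h : ∀ t ∈ l, t = "o" ∨ t = "x") :
    PySem.List.sorted l (fun t => t) false
      = List.replicate (l.count "o") "o" ++ List.replicate (l.count "x") "x" := by
  apply PySem.List.sorted_id_eq_of_perm_of_pairwise
  · exact (perm_blocks l h).symm
  · refine List.pairwise_append.2 ⟨?_, ?_, ?_⟩
    · exact List.pairwise_replicate.2 (Or.inr le_rfl)
    · exact List.pairwise_replicate.2 (Or.inr le_rfl)
    · intro a ha b hb
      rw [List.eq_of_mem_replicate ha, List.eq_of_mem_replicate hb]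
      exact le_of_lt (String.lt_iff_toList_lt.mpr (by decide))

-- The mirror of the two-block list swaps the block lengths.
theorem mirror_blocks (a b : Nat) :
    ((List.replicate a "o" ++ List.replicate b "x").reverse.map
        (fun t => if t == "x" then "o" else "x"))
      = List.replicate b "o" ++ List.replicate a "x" := by
  simp [List.reverse_append, List.map_replicate]

theorem blocks_eq_iff (a b : Nat) :
    (List.replicate a "o" ++ List.replicate b "x"
      = List.replicate b "o" ++ List.replicate a "x") ↔ a = b := by
  constructor
  · intro h
    have := congrArg (fun l => l.count "o") h
    simpa [List.count_replicate] using this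
  · rintro rfl; rfl

-- ===== VERDICT (by name: the statement is the Claim_ definition above) =====
theorem xo_spec : Claim_equal_xo := by
  intro s _
  unfold Spec_xo xo xo_alt
  set l := PySem.Str.split₀ s with hl
  have hf : ∀ t ∈ l.filter (fun t => t == "x" || t == "o"), t = "o" ∨ t = "x" := by
    intro t ht
    have := List.of_mem_filter ht
    simp only [Bool.or_eq_true, beq_iff_eq] at this
    tauto
  have hsort := sorted_blocks _ hf
  have hcx : (l.filter (fun t => t == "x" || t == "o")).count "x" = l.count "x" := by
    simp [List.count_filter]
  have hco : (l.filter (fun t => t == "x" || t == "o")).count "o" = l.count "o" := by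
    simp [List.count_filter]
  simp only [xo_fold_counts, hsort, hcx, hco, mirror_blocks]
  by_cases h : l.count "x" = l.count "o"
  · rw [h]
    simp
  · have h1 : ¬ ((0 : Int) + l.count "x" = 0 + l.count "o") := by
      intro hc; apply h; omega
    have h2 : ¬ (List.replicate (l.count "o") "o" ++ List.replicate (l.count "x") "x"
        = List.replicate (l.count "x") "o" ++ List.replicate (l.count "o") "x") := by
      intro hc; exact h ((blocks_eq_iff _ _).1 hc).symm
    simp [h2]
    exact h
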